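-- pv_equiv track=rewrite | github.com/kr0bi/adventofcode-2020 | day06/ex06.py | count_repeated_character
-- ===== SOURCE A (Python) =====
-- group = []
--
-- def count_repeated_character (group):
--     dictionary = {}
--     for person in group:
--         for question in person:
--             if question in dictionary:
--                 dictionary[question] += 1
--             else:
--                 dictionary[question] = 1
--     number_of_person = len(group)
--     count = 0
--     for key in dictionary:
--         if number_of_person == dictionary[key]:
--             count += 1
--     return count
-- ===== SOURCE B (Python) =====
-- from itertools import groupby
--
-- def count_repeated_character(group):
--     # sort the concatenation of all answers, then count runs whose length
--     # equals the number of persons in the group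
--     n = len(group)
--     count = 0
--     for _, run in groupby(sorted("".join(group))):
--         if sum(1 for _ in run) == n:
--             count += 1
--     return count
-- ===== Notes on version B (the rewrite author's own statement) =====
-- stated objective: alternative
-- what changed: Replaced the per-character dictionary counting pass plus the dict-scanning pass by concatenating all answers, sorting them, and counting with itertools.groupby the runs whose length equals the group size.
import Mathlib
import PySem

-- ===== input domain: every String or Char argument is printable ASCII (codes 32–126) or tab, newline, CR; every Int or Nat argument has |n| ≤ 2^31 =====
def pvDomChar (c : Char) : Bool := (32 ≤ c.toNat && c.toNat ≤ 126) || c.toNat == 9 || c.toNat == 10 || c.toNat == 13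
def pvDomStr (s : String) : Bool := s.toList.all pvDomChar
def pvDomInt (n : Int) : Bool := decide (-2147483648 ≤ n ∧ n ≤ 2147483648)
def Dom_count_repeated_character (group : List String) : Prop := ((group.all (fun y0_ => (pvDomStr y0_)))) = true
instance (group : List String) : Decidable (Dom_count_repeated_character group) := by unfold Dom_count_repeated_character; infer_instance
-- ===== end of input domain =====

-- B replaces A's dictionary-counting pass by sort-then-group-runs; same result, no speed claim.

-- ===== PORT A =====
def count_repeated_character (group : List String) : Int :=
  let dictionary := group.foldl (fun d person =>
    person.toList.foldl (fun d question =>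
      if d.contains question then d.insert question (d.getD question 0 + 1)
      else d.insert question 1) d) PySem.Dict.empty
  let number_of_person : Int := group.length
  dictionary.keys.foldl (fun count key =>
    if number_of_person = dictionary.getD key 0 then count + 1 else count) 0

-- ===== PORT B =====
-- runs of adjacent equal characters with their lengths (itertools.groupby)
def pvRuns : List Char → List (Char × Nat)
  | [] => []
  | c :: rest =>
    (c, (rest.takeWhile (· == c)).length + 1) :: pvRuns (rest.dropWhile (· == c))
termination_by l => l.length
decreasing_by
  have := List.length_dropWhile_le (· == c) rest
  simp only [List.length_cons]
  omega

def count_repeated_character_alt (group : List String) : Int :=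
  let n := group.length
  let chars := PySem.List.sorted (group.flatMap (·.toList)) (fun c => c) false
  ((pvRuns chars).countP (fun p => p.2 == n) : Int)

-- ===== PRECONDITION & SPEC =====
def Spec_count_repeated_character (group : List String) (out : Int) : Prop := out = count_repeated_character_alt group
instance (group : List String) (out : Int) : Decidable (Spec_count_repeated_character group out) := by unfold Spec_count_repeated_character; infer_instance

-- ===== CLAIM (what is proved, stated in full; the proofs are below) =====
def Claim_equal_count_repeated_character : Prop := ∀ (group : List String), Dom_count_repeated_character group → Spec_count_repeated_character group (count_repeated_character group)

-- ===== LEMMAS AND PROOFS =====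

-- A's nested loop builds exactly Counter(concatenation)
theorem pv_step_eq (d : PySem.Dict Char Int) (q : Char) :
    (if d.contains q then d.insert q (d.getD q 0 + 1) else d.insert q 1)
      = d.insert q (d.getD q 0 + 1) := by
  by_cases h : d.contains q = true
  · simp [h]
  · have h' : d.contains q = false := by simpa using h
    rw [PySem.Dict.getD_of_not_contains (h := h')]
    simp [h']

theorem pv_dict_eq (group : List String) :
    group.foldl (fun d person =>
      person.toList.foldl (fun d question =>
        if d.contains question then d.insert question (d.getD question 0 + 1)
        else d.insert question 1) d) PySem.Dict.empty
      = PySem.Dict.counter (group.flatMap (·.toList)) := by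
  simp only [pv_step_eq]
  rw [← PySem.Dict.foldl_insert_getD_add_one_eq_counter]
  generalize (PySem.Dict.empty : PySem.Dict Char Int) = d
  induction group generalizing d with
  | nil => simp
  | cons s t ih => simp [List.foldl_append, ih]

-- a counting foldl is countP
theorem pv_foldl_count {α : Type} (p : α → Prop) [DecidablePred p] (l : List α) (c : Int) :
    l.foldl (fun c k => if p k then c + 1 else c) c = c + (l.countP (fun k => decide (p k)) : Int) := by
  induction l generalizing c with
  | nil => simp
  | cons x t ih =>
    by_cases h : p x <;> simp [h, ih]; ring

-- main characterization of runs on a sorted list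
theorem pvRuns_sorted_spec (ys : List Char) (h : ys.Pairwise (· ≤ ·)) :
    ((pvRuns ys).map Prod.fst).Nodup ∧
    (∀ p ∈ pvRuns ys, p.2 = ys.count p.1) ∧
    (∀ c, c ∈ (pvRuns ys).map Prod.fst ↔ c ∈ ys) := by
  induction ys using pvRuns.induct with
  | case1 => simp [pvRuns]
  | case2 c rest ih =>
    have hsuf_sorted : (rest.dropWhile (· == c)).Pairwise (· ≤ ·) :=
      ((List.pairwise_cons.mp h).2.sublist (List.dropWhile_sublist _))
    obtain ⟨hnd, hcnt, hmem⟩ := ih hsuf_sorted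
    have hrest := (List.pairwise_cons.mp h).1
    have hpre : ∀ x ∈ rest.takeWhile (· == c), x = c := by
      intro x hx
      simpa using List.mem_takeWhile_imp hx
    have hcnot : c ∉ rest.dropWhile (· == c) := by
      intro hc
      cases hd : rest.dropWhile (· == c) with
      | nil => simp [hd] at hc
      | cons d t =>
        have hdne : (d == c) = false := by
          have := List.head?_dropWhile_not (· == c) rest
          simpa [hd] using this
        have hdmem : d ∈ rest := (List.dropWhile_sublist _).mem (by rw [hd]; exact List.mem_cons_self)
        have hdnec : d ≠ c := by intro he; simp [he] at hdne
        have hcd : c < d := lt_of_le_of_ne (hrest d hdmem) (Ne.symm hdnec)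
        rw [hd] at hc
        rcases List.mem_cons.mp hc with rfl | hct
        · exact absurd rfl (ne_of_gt hcd)
        · have : d ≤ c := (List.pairwise_cons.mp (hd ▸ hsuf_sorted)).1 c hct
          exact absurd (lt_of_lt_of_le hcd this) (lt_irrefl c)
    have hsplit : rest = rest.takeWhile (· == c) ++ rest.dropWhile (· == c) :=
      (List.takeWhile_append_dropWhile).symm
    have hfst_sub : ∀ x ∈ (pvRuns (rest.dropWhile (· == c))).map Prod.fst, x ∈ rest.dropWhile (· == c) :=
      fun x hx => (hmem x).mp hx
    refine ⟨?_, ?_, ?_⟩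
    · rw [pvRuns]
      simp only [List.map_cons, List.nodup_cons]
      exact ⟨fun hc => hcnot (hfst_sub c hc), hnd⟩
    · rw [pvRuns]
      intro p hp
      rcases List.mem_cons.mp hp with rfl | hp'
      · simp only [List.count_cons_self]
        conv_rhs => rw [hsplit]
        rw [List.count_append]
        have h1 : (rest.takeWhile (· == c)).count c = (rest.takeWhile (· == c)).length :=
          List.count_eq_length.mpr (fun x hx => by simp [hpre x hx])
        have h2 : (rest.dropWhile (· == c)).count c = 0 := List.count_eq_zero.mpr hcnot
        omega
      · have hp1 : p.1 ∈ rest.dropWhile (· == c) := by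
          refine hfst_sub p.1 ?_
          exact List.mem_map.mpr ⟨p, hp', rfl⟩
        have hne : p.1 ≠ c := fun he => hcnot (he ▸ hp1)
        rw [hcnt p hp']
        conv_rhs => rw [hsplit]
        rw [List.count_cons, List.count_append]
        have h0 : (rest.takeWhile (· == c)).count p.1 = 0 :=
          List.count_eq_zero.mpr (fun hx => hne (hpre _ hx))
        have hne' : ¬ c = p.1 := fun he => hne he.symm
        simp [hne', h0]
    · intro x
      rw [pvRuns]
      simp only [List.map_cons, List.mem_cons, hmem]
      constructor
      · rintro (rfl | hx)
        · exact Or.inl rfl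
        · exact Or.inr ((List.dropWhile_sublist _).mem hx)
      · rintro (rfl | hx)
        · exact Or.inl rfl
        · rw [hsplit] at hx
          rcases List.mem_append.mp hx with h1 | h1
          · exact Or.inl (hpre _ h1)
          · exact Or.inr h1

-- ===== VERDICT (by name: the statement is the Claim_ definition above) =====
theorem count_repeated_character_spec : Claim_equal_count_repeated_character := by
  intro group _
  unfold Spec_count_repeated_character count_repeated_character count_repeated_character_alt
  simp only []
  rw [pv_dict_eq]
  rw [pv_foldl_count (fun k => (group.length : Int) = (PySem.Dict.counter (group.flatMap (·.toList))).getD k 0)]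
  rw [zero_add]
  have hsorted := PySem.List.sorted_pairwise (group.flatMap (·.toList)) (fun c => c)
  obtain ⟨hnd, hcnt, hmem⟩ := pvRuns_sorted_spec _ hsorted
  set all := group.flatMap (·.toList) with hall
  set ys := PySem.List.sorted all (fun c => c) false with hys
  have hperm : ys.Perm all := PySem.List.sorted_perm all (fun c => c) false
  norm_cast
  have hB : (pvRuns ys).countP (fun p => p.2 == group.length)
      = ((pvRuns ys).map Prod.fst).countP (fun c => all.count c == group.length) := by
    rw [List.countP_map]
    apply List.countP_congr
    intro p hp
    simp only [Function.comp]
    rw [hcnt p hp, hperm.count_eq]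
  have hA : (PySem.Set.ofList all).countP
        (fun k => decide ((group.length : Int) = (PySem.Dict.counter all).getD k 0))
      = (PySem.Set.ofList all).countP (fun c => all.count c == group.length) := by
    apply List.countP_congr
    intro k _
    rw [PySem.Dict.getD_counter]
    simp only [Nat.cast_inj, beq_iff_eq]
    exact ⟨fun h => (of_decide_eq_true h).symm, fun h => decide_eq_true h.symm⟩
  have hp2 : (PySem.Set.ofList all).Perm ((pvRuns ys).map Prod.fst) := by
    rw [List.perm_ext_iff_of_nodup (PySem.Set.nodup_ofList all) hnd]
    intro a
    rw [PySem.Set.mem_ofList, hmem, PySem.List.mem_sorted]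
  rw [PySem.Dict.keys_counter, hA, hp2.countP_eq, hB]
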